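-- pv_equiv track=rewrite | github.com/Sh9hid/thepropertydomain-frontend-proxy-public | backend/api/routes/operator.py | _operator_counts
-- ===== SOURCE A (Python) =====
-- from typing import Any, Dict, List, Optional
--
-- def _operator_counts(tasks: List[Dict[str, Any]], appointments: List[Dict[str, Any]]) -> Dict[str, int]:
--     counts = {
--         "total_tasks": len(tasks),
--         "calls": 0,
--         "sms": 0,
--         "emails": 0,
--         "callbacks": 0,
--         "manual": 0,
--         "pending_approvals": 0,
--         "queued_sends": 0,
--         "failed_sends": 0,
--         "appointments": len(appointments),
--     }
--     for task in tasks: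
--         channel = task.get("channel") or task.get("task_type") or "manual"
--         bucket = task.get("priority_bucket") or ""
--         approval_status = task.get("approval_status") or "not_required"
--         if channel == "call":
--             counts["calls"] += 1
--         elif channel == "sms":
--             counts["sms"] += 1
--         elif channel == "email":
--             counts["emails"] += 1
--         else:
--             counts["manual"] += 1
--         if bucket == "callback_due":
--             counts["callbacks"] += 1
--         if approval_status == "pending":
--             counts["pending_approvals"] += 1
--         elif approval_status == "approved":
--             counts["queued_sends"] += 1
--         elif approval_status == "failed":
--             counts["failed_sends"] += 1
--     return counts
-- ===== SOURCE B (Python) =====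
-- from typing import Any, Dict, List, Optional
--
-- def _operator_counts(tasks: List[Dict[str, Any]], appointments: List[Dict[str, Any]]) -> Dict[str, int]:
--     # Tabulate-then-index: normalize each task's channel/approval first, then
--     # assemble the result by counting; manual is derived by subtraction.
--     channels = [task.get("channel") or task.get("task_type") or "manual" for task in tasks]
--     approvals = [task.get("approval_status") or "not_required" for task in tasks]
--     calls = channels.count("call")
--     sms = channels.count("sms")
--     emails = channels.count("email")
--     return {
--         "total_tasks": len(tasks),
--         "calls": calls,
--         "sms": sms,
--         "emails": emails,
--         "callbacks": sum(1 for task in tasks if (task.get("priority_bucket") or "") == "callback_due"),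
--         "manual": len(tasks) - calls - sms - emails,
--         "pending_approvals": approvals.count("pending"),
--         "queued_sends": approvals.count("approved"),
--         "failed_sends": approvals.count("failed"),
--         "appointments": len(appointments),
--     }
-- ===== Notes on version B (the rewrite author's own statement) =====
-- stated objective: idiomatic
-- what changed: Replaces the per-task if/elif mutation of a counts dict with a tabulate-then-index decomposition: normalize channels and approval statuses once into lists, count each category with list.count / a generator sum, and derive manual by subtraction from the total.
import Mathlib
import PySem

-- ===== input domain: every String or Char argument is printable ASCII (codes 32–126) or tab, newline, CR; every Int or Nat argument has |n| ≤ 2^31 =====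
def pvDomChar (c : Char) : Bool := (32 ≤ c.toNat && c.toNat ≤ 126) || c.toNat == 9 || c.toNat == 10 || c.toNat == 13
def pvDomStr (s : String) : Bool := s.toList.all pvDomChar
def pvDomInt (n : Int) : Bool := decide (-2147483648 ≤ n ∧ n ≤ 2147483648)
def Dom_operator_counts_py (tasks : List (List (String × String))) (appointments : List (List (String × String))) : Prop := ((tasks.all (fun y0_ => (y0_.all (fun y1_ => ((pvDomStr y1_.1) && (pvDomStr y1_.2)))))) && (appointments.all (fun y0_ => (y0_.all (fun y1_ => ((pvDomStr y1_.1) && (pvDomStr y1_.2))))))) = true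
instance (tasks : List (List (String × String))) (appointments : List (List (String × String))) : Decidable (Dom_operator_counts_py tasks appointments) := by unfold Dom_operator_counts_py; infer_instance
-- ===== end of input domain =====

-- B replaces A's per-task if/elif accumulation over a dict with a tabulate-then-index
-- decomposition (normalize once, count each category, derive manual by subtraction); objective: idiomatic.

-- ===== PORT A =====
-- task.get(k) on an association-list dict (first match)
def pvGet (t : List (String × String)) (k : String) : Option String :=
  (PySem.Dict.mk t).get? k

-- Python's `x or y` for an optional string x: y when x is None or "" (falsy)
def pvOrS (x : Option String) (y : String) : String :=
  match x with
  | none => y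
  | some s => if s = "" then y else s

-- channel = task.get("channel") or task.get("task_type") or "manual"
def pvChan (t : List (String × String)) : String :=
  pvOrS (pvGet t "channel") (pvOrS (pvGet t "task_type") "manual")

-- bucket = task.get("priority_bucket") or ""
def pvBucket (t : List (String × String)) : String :=
  pvOrS (pvGet t "priority_bucket") ""

-- approval_status = task.get("approval_status") or "not_required"
def pvAppr (t : List (String × String)) : String :=
  pvOrS (pvGet t "approval_status") "not_required"

-- the three statements of A's loop body (counts[k] += 1 is modify at an always-present key)
def pvStepChan (t : List (String × String)) (d : PySem.Dict String Int) : PySem.Dict String Int :=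
  if pvChan t = "call" then d.modify "calls" 0 (· + 1)
  else if pvChan t = "sms" then d.modify "sms" 0 (· + 1)
  else if pvChan t = "email" then d.modify "emails" 0 (· + 1)
  else d.modify "manual" 0 (· + 1)

def pvStepBucket (t : List (String × String)) (d : PySem.Dict String Int) : PySem.Dict String Int :=
  if pvBucket t = "callback_due" then d.modify "callbacks" 0 (· + 1) else d

def pvStepAppr (t : List (String × String)) (d : PySem.Dict String Int) : PySem.Dict String Int :=
  if pvAppr t = "pending" then d.modify "pending_approvals" 0 (· + 1)
  else if pvAppr t = "approved" then d.modify "queued_sends" 0 (· + 1)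
  else if pvAppr t = "failed" then d.modify "failed_sends" 0 (· + 1)
  else d

def pvStep (d : PySem.Dict String Int) (t : List (String × String)) : PySem.Dict String Int :=
  pvStepAppr t (pvStepBucket t (pvStepChan t d))

-- A's initial counts dict, with every numeric slot a parameter (for the loop invariant)
def pvInit (tl al : Int) (c s e cb m p q f : Int) : PySem.Dict String Int :=
  PySem.Dict.mk [("total_tasks", tl), ("calls", c), ("sms", s), ("emails", e),
    ("callbacks", cb), ("manual", m), ("pending_approvals", p), ("queued_sends", q),
    ("failed_sends", f), ("appointments", al)]

def operator_counts_py (tasks : List (List (String × String))) (appointments : List (List (String × String))) : List (String × Int) :=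
  (tasks.foldl pvStep (pvInit (tasks.length : Int) (appointments.length : Int) 0 0 0 0 0 0 0 0)).items

-- ===== PORT B =====
def operator_counts_py_alt (tasks : List (List (String × String))) (appointments : List (List (String × String))) : List (String × Int) :=
  let channels := tasks.map pvChan
  let approvals := tasks.map pvAppr
  let calls : Int := channels.count "call"
  let sms : Int := channels.count "sms"
  let emails : Int := channels.count "email"
  [("total_tasks", (tasks.length : Int)),
   ("calls", calls), ("sms", sms), ("emails", emails),
   ("callbacks", ((tasks.filter (fun t => pvBucket t = "callback_due")).length : Int)),
   ("manual", (tasks.length : Int) - calls - sms - emails),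
   ("pending_approvals", (approvals.count "pending" : Int)),
   ("queued_sends", (approvals.count "approved" : Int)),
   ("failed_sends", (approvals.count "failed" : Int)),
   ("appointments", (appointments.length : Int))]

-- ===== PRECONDITION & SPEC =====
def Spec_operator_counts_py (tasks : List (List (String × String))) (appointments : List (List (String × String))) (out : List (String × Int)) : Prop := out = operator_counts_py_alt tasks appointments
instance (tasks : List (List (String × String))) (appointments : List (List (String × String))) (out : List (String × Int)) : Decidable (Spec_operator_counts_py tasks appointments out) := by unfold Spec_operator_counts_py; infer_instance

-- ===== CLAIM (what is proved, stated in full; the proofs are below) =====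
def Claim_equal_operator_counts_py : Prop := ∀ (tasks : List (List (String × String))) (appointments : List (List (String × String))), Dom_operator_counts_py tasks appointments → Spec_operator_counts_py tasks appointments (operator_counts_py tasks appointments)

-- ===== LEMMAS AND PROOFS =====

theorem pvStepChan_init (t : List (String × String)) (tl al c s e cb m p q f : Int) :
    pvStepChan t (pvInit tl al c s e cb m p q f)
    = pvInit tl al
        (if pvChan t = "call" then c + 1 else c)
        (if ¬pvChan t = "call" ∧ pvChan t = "sms" then s + 1 else s)
        (if ¬pvChan t = "call" ∧ ¬pvChan t = "sms" ∧ pvChan t = "email" then e + 1 else e)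
        cb
        (if ¬pvChan t = "call" ∧ ¬pvChan t = "sms" ∧ ¬pvChan t = "email" then m + 1 else m)
        p q f := by
  unfold pvStepChan
  split_ifs <;> first | rfl | tauto

theorem pvStepBucket_init (t : List (String × String)) (tl al c s e cb m p q f : Int) :
    pvStepBucket t (pvInit tl al c s e cb m p q f)
    = pvInit tl al c s e (if pvBucket t = "callback_due" then cb + 1 else cb) m p q f := by
  unfold pvStepBucket
  split_ifs <;> rfl

theorem pvStepAppr_init (t : List (String × String)) (tl al c s e cb m p q f : Int) :
    pvStepAppr t (pvInit tl al c s e cb m p q f)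
    = pvInit tl al c s e cb m
        (if pvAppr t = "pending" then p + 1 else p)
        (if ¬pvAppr t = "pending" ∧ pvAppr t = "approved" then q + 1 else q)
        (if ¬pvAppr t = "pending" ∧ ¬pvAppr t = "approved" ∧ pvAppr t = "failed" then f + 1 else f) := by
  unfold pvStepAppr
  split_ifs <;> first | rfl | tauto

theorem pvInit_congr {tl al c s e cb m p q f c' s' e' cb' m' p' q' f' : Int}
    (h1 : c = c') (h2 : s = s') (h3 : e = e') (h4 : cb = cb') (h5 : m = m')
    (h6 : p = p') (h7 : q = q') (h8 : f = f') :
    pvInit tl al c s e cb m p q f = pvInit tl al c' s' e' cb' m' p' q' f' := by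
  rw [h1, h2, h3, h4, h5, h6, h7, h8]

-- A's loop, characterized: each slot is the seed plus a count over the tasks processed
theorem pvLoopA (ts : List (List (String × String))) (tl al c s e cb m p q f : Int) :
    ts.foldl pvStep (pvInit tl al c s e cb m p q f)
    = pvInit tl al
        (c + ((ts.map pvChan).count "call" : Int))
        (s + ((ts.map pvChan).count "sms" : Int))
        (e + ((ts.map pvChan).count "email" : Int))
        (cb + ((ts.filter (fun t => pvBucket t = "callback_due")).length : Int))
        (m + ((ts.countP (fun t => ¬(pvChan t = "call" ∨ pvChan t = "sms" ∨ pvChan t = "email"))) : Int))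
        (p + (((ts.map pvAppr).count "pending") : Int))
        (q + (((ts.map pvAppr).count "approved") : Int))
        (f + (((ts.map pvAppr).count "failed") : Int)) := by
  induction ts generalizing c s e cb m p q f with
  | nil => simp
  | cons t ts ih =>
    rw [List.foldl_cons]
    show List.foldl pvStep (pvStepAppr t (pvStepBucket t (pvStepChan t (pvInit tl al c s e cb m p q f)))) ts = _
    rw [pvStepChan_init, pvStepBucket_init, pvStepAppr_init, ih]
    clear ih
    simp only [List.map_cons, List.count_cons, List.countP_cons, List.filter_cons,
      beq_iff_eq, decide_eq_true_eq]
    apply pvInit_congr <;>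
      split_ifs <;>
      first
        | rfl
        | ((try simp only [List.length_cons]); (try push_cast); omega)
        | (exfalso; tauto)
        | (exfalso; simp_all)

-- the four channel categories partition the tasks
theorem pvChan_partition (ts : List (List (String × String))) :
    (ts.map pvChan).count "call" + (ts.map pvChan).count "sms" + (ts.map pvChan).count "email"
      + ts.countP (fun t => ¬(pvChan t = "call" ∨ pvChan t = "sms" ∨ pvChan t = "email"))
      = ts.length := by
  induction ts with
  | nil => rfl
  | cons t ts ih =>
    simp only [List.map_cons, List.count_cons, List.countP_cons, List.length_cons, beq_iff_eq,
      decide_eq_true_eq]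
    split_ifs <;> first | omega | (exfalso; tauto) | (exfalso; simp_all)

-- ===== VERDICT (by name: the statement is the Claim_ definition above) =====
theorem operator_counts_py_spec : Claim_equal_operator_counts_py := by
  intro tasks appointments _
  unfold Spec_operator_counts_py operator_counts_py operator_counts_py_alt
  rw [pvLoopA]
  unfold pvInit
  simp only [zero_add]
  have hc : ((tasks.countP (fun t => ¬(pvChan t = "call" ∨ pvChan t = "sms" ∨ pvChan t = "email"))) : Int)
      = (tasks.length : Int) - (tasks.map pvChan).count "call" - (tasks.map pvChan).count "sms"
        - (tasks.map pvChan).count "email" := by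
    have h := pvChan_partition tasks
    omega
  rw [hc]
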